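-- pv_equiv track=rewrite | github.com/Geoffrey42/21sh | src/header_changer.py | replace_user_email
-- ===== SOURCE A (Python) =====
-- def replace_user_email(login, copy):
--     logins_to_delete = [
--             "/*   By: piranucci <piranucci@student.42.fr>        +#+  +:+       +#+        */",
--             "/*   By: piranucc <piranucc@student.42.fr>          +#+  +:+       +#+        */",
--             "/*   By: piranucc <piranucci@student.42.fr>         +#+  +:+       +#+        */",
--             "/*   By: piranucc <marvin@42.fr>                    +#+  +:+       +#+        */",
--             "/*   By: lprunier <lprunier@student.42.fr>          +#+  +:+       +#+        */",
--             "/*   By: lprunier <marvin@student.42.fr>            +#+  +:+       +#+        */",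
--             ]
--     correct_line = "/*   By: ggane <marvin@42.fr>                       +#+  +:+       +#+        */"
--     for searched_login in logins_to_delete:
--         if copy.find(searched_login) != -1:
--             copy = copy.replace(searched_login, correct_line)
--     return copy
-- ===== SOURCE B (Python) =====
-- def replace_user_email(login, copy):
--     logins_to_delete = [
--             "/*   By: piranucci <piranucci@student.42.fr>        +#+  +:+       +#+        */",
--             "/*   By: piranucc <piranucc@student.42.fr>          +#+  +:+       +#+        */",
--             "/*   By: piranucc <piranucci@student.42.fr>         +#+  +:+       +#+        */",
--             "/*   By: piranucc <marvin@42.fr>                    +#+  +:+       +#+        */",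
--             "/*   By: lprunier <lprunier@student.42.fr>          +#+  +:+       +#+        */",
--             "/*   By: lprunier <marvin@student.42.fr>            +#+  +:+       +#+        */",
--             ]
--     correct_line = "/*   By: ggane <marvin@42.fr>                       +#+  +:+       +#+        */"
--     marker = "/*   By: "           # common 9-char prefix of every known login line
--     known = set(logins_to_delete)  # each entry is exactly 80 characters long
--     out = []
--     i = 0
--     n = len(copy)
--     while i < n:
--         if copy.startswith(marker, i) and copy[i:i + 80] in known:
--             out.append(correct_line)
--             i += 80
--         else:
--             out.append(copy[i])
--             i += 1
--     return "".join(out)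
-- ===== Notes on version B (the rewrite author's own statement) =====
-- stated objective: alternative
-- what changed: Six sequential whole-string str.replace passes (each guarded by a redundant find) are replaced by one left-to-right scan that at each position recognizes any known 80-character login line via its common '/* By: ' prefix plus a set lookup and emits correct_line once.
import Mathlib
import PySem

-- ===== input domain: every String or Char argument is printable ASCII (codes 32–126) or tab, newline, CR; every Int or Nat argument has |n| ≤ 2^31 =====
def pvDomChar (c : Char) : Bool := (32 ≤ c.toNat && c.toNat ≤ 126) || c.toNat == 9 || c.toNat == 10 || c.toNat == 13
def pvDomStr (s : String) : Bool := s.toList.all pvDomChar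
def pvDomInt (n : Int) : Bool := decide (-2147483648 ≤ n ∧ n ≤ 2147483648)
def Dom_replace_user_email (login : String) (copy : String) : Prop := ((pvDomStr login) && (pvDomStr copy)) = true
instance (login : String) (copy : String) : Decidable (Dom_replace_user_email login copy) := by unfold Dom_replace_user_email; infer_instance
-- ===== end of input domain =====

-- B replaces A's six sequential str.replace passes by one left-to-right scan recognizing any
-- known 80-char login line (common "/*   By: " prefix + set lookup); equivalence is proved on
-- copies that do not contain "*/*   By: " (i.e. no overlapping header-line occurrences).

-- ===== PORT A =====
def pvLogins : List String := [
  "/*   By: piranucci <piranucci@student.42.fr>        +#+  +:+       +#+        */",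
  "/*   By: piranucc <piranucc@student.42.fr>          +#+  +:+       +#+        */",
  "/*   By: piranucc <piranucci@student.42.fr>         +#+  +:+       +#+        */",
  "/*   By: piranucc <marvin@42.fr>                    +#+  +:+       +#+        */",
  "/*   By: lprunier <lprunier@student.42.fr>          +#+  +:+       +#+        */",
  "/*   By: lprunier <marvin@student.42.fr>            +#+  +:+       +#+        */"]

def pvCorrect : String := "/*   By: ggane <marvin@42.fr>                       +#+  +:+       +#+        */"

-- literal transliteration of A: for each searched login, if copy.find(...) != -1, replace it
def replace_user_email (login : String) (copy : String) : String :=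
  pvLogins.foldl
    (fun c searched =>
      if PySem.Str.find c searched ≠ -1 then PySem.Str.replace c searched pvCorrect else c)
    copy

-- ===== PORT B =====
def pvPats : List (List Char) := pvLogins.map String.toList
def pvCorrectL : List Char := pvCorrect.toList
def pvMarker : List Char := "/*   By: ".toList
def pvKnown : PySem.Set (List Char) := PySem.Set.ofList pvPats

-- Source B's while-loop over index i, transcribed as recursion on the remaining suffix
-- (fuel = number of remaining loop iterations = remaining length; Source B consumes ≥ 1 char per step)
def pvScanGo : Nat → List Char → List Char
  | _, [] => []
  | 0, s => s
  | fuel + 1, c :: t =>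
    if pvMarker.isPrefixOf (c :: t) && pvKnown.contains ((c :: t).take 80) then
      pvCorrectL ++ pvScanGo fuel ((c :: t).drop 80)
    else
      c :: pvScanGo fuel t

def replace_user_email_alt (login : String) (copy : String) : String :=
  String.ofList (pvScanGo copy.toList.length copy.toList)

-- ===== PRECONDITION & SPEC =====
-- Pre_ excludes copies containing "*/*   By: ": there two known login lines (or one and the
-- substituted line) can overlap on the shared '/', and A's repeated passes may re-match across an
-- already-substituted line while B's single scan does not — a degenerate corner neither behaviour
-- of which is specified; on every other input A and B agree.
def Pre_replace_user_email (login : String) (copy : String) : Prop :=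
  ¬ ("*/*   By: ".toList <:+: copy.toList)
instance (login : String) (copy : String) : Decidable (Pre_replace_user_email login copy) := by
  unfold Pre_replace_user_email; infer_instance

def pvWitness_replace_user_email : String × String := ("user", "int main(void)")

def Spec_replace_user_email (login : String) (copy : String) (out : String) : Prop :=
  out = replace_user_email_alt login copy
instance (login : String) (copy : String) (out : String) :
    Decidable (Spec_replace_user_email login copy out) := by
  unfold Spec_replace_user_email; infer_instance

-- ===== CLAIM (what is proved, stated in full; the proofs are below) =====
def Claim_equal_replace_user_email : Prop :=
  ∀ (login : String) (copy : String), Dom_replace_user_email login copy →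
    Pre_replace_user_email login copy →
    Spec_replace_user_email login copy (replace_user_email login copy)

-- ===== LEMMAS AND PROOFS =====

-- the forbidden junction substring and the goodness predicate
def pvBad : List Char := "*/*   By: ".toList
def pvGood (s : List Char) : Prop := ¬ pvBad <:+: s

-- proof-side model of Python's str.replace(q, correct_line): left-to-right non-overlapping scan
def pvRp (q : List Char) : List Char → List Char
  | [] => []
  | c :: t =>
    if q.isPrefixOf (c :: t) then pvCorrectL ++ pvRp q (t.drop (q.length - 1))
    else c :: pvRp q t
  termination_by s => s.length
  decreasing_by
  · simp only [List.length_drop, List.length_cons]; omega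
  · simp

def pvChain (Q : List (List Char)) (s : List Char) : List Char :=
  Q.foldl (fun c q => pvRp q c) s

def pvRC : List (List Char) := pvCorrectL :: pvPats

-- ---- decidable facts about the literal patterns ----
lemma fact_len : ∀ x ∈ pvRC, x.length = 80 := by decide
lemma fact_take9 : ∀ q ∈ pvPats, q.take 9 = pvCorrectL.take 9 := by decide
lemma fact_drop71 : ∀ x ∈ pvRC, x.drop 71 = pvCorrectL.drop 71 := by decide
set_option maxRecDepth 40000 in
lemma fact_nobad : ∀ x ∈ pvRC, ¬ pvBad <:+: x := by decide
set_option maxRecDepth 40000 in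
lemma fact_overlap : ∀ x ∈ pvRC, ∀ q ∈ pvPats, ∀ i < 78, x.drop (i + 1) ≠ q.take (79 - i) := by decide
set_option maxRecDepth 40000 in
lemma fact_overlap2 : ∀ q ∈ pvPats, ∀ m < 78, q.drop (m + 1) ≠ pvCorrectL.take (79 - m) := by decide
lemma fact_drop78 : ∀ x ∈ pvRC, x.drop 78 = ['*', '/'] := by decide
lemma fact_badq : ∀ q ∈ pvPats, pvBad = '*' :: '/' :: (q.drop 1).take 8 := by decide
lemma fact_drop79 : ∀ x ∈ pvRC, x.drop 79 = ['/'] := by decide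
lemma fact_take1 : ∀ q ∈ pvPats, q.take 1 = ['/'] := by decide
lemma fact_marker : ∀ q ∈ pvPats, pvMarker <+: q := by decide
lemma fact_nonnil : ∀ p ∈ pvLogins, p.toList ≠ [] := by decide
lemma fact_nodup : pvPats.Nodup := by decide
lemma fact_rnot : pvCorrectL ∉ pvPats := by decide

-- ---- equation lemmas ----
lemma pvRp_nil (q : List Char) : pvRp q [] = [] := by simp [pvRp]

lemma pvRp_cons (q : List Char) (c : Char) (t : List Char) :
    pvRp q (c :: t) =
      if q.isPrefixOf (c :: t) then pvCorrectL ++ pvRp q (t.drop (q.length - 1))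
      else c :: pvRp q t := by
  rw [pvRp]

lemma chain_cons (q : List Char) (Q : List (List Char)) (s : List Char) :
    pvChain (q :: Q) s = pvChain Q (pvRp q s) := rfl

-- ---- small generic helpers ----
lemma h_pref_take {u v : List Char} {k : Nat} (h : u <+: v) (hl : u.length ≤ k) :
    u <+: v.take k := by
  rw [List.prefix_iff_eq_take] at h ⊢
  rw [List.take_take, Nat.min_eq_left hl]
  exact h

lemma h_infix_of_prefix_drop {u v : List Char} {i : Nat} (h : u <+: v.drop i) : u <:+: v :=
  h.isInfix.trans (List.drop_suffix i v).isInfix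

lemma h_exists_drop_of_infix {u v : List Char} (h : u <:+: v) : ∃ i, u <+: v.drop i := by
  obtain ⟨l, r, rfl⟩ := h
  exact ⟨l.length, by simpa [List.append_assoc] using List.prefix_append u r⟩

lemma h_append_pref {u v w : List Char} (h : u <+: v) : w ++ u <+: w ++ v := by
  obtain ⟨z, rfl⟩ := h
  exact ⟨z, by simp⟩

lemma h_good_suffix {s t : List Char} (h : pvGood s) (hs : t <:+ s) : pvGood t :=
  fun hin => h (hin.trans hs.isInfix)

lemma h_mem_contains {xs : List (List Char)} {x : List Char} :
    PySem.Set.contains (PySem.Set.ofList xs) x = true ↔ x ∈ xs := by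
  rw [PySem.Set.contains, List.contains_iff_mem]
  exact PySem.Set.mem_ofList (y := x) (xs := xs)

-- ---- PySem.Str.replace coincides with pvRp ----
lemma go_eq (q : List Char) (hq : q ≠ []) :
    ∀ fuel l acc, l.length ≤ fuel →
      PySem.Chars.replace.go q pvCorrectL fuel l acc = acc.reverse ++ pvRp q l := by
  intro fuel
  induction fuel with
  | zero =>
    intro l acc hl
    have hnil : l = [] := List.eq_nil_of_length_eq_zero (Nat.le_zero.mp hl)
    subst hnil
    rw [PySem.Chars.replace.go]
    simp [pvRp_nil]
  | succ f ih =>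
    intro l acc hl
    match l with
    | [] =>
      rw [PySem.Chars.replace.go]
      simp [pvRp_nil]
      omega
    | c :: t =>
      rw [PySem.Chars.replace.go]
      have hq1 : 1 ≤ q.length := List.length_pos_iff.mpr hq
      by_cases hp : q.isPrefixOf (c :: t)
      · rw [if_pos hp]
        have hlen : (List.drop q.length (c :: t)).length ≤ f := by
          simp only [List.length_drop, List.length_cons]
          simp only [List.length_cons] at hl
          omega
        rw [ih _ _ hlen]
        have hd : List.drop q.length (c :: t) = t.drop (q.length - 1) := by
          obtain ⟨n, hn⟩ : ∃ n, q.length = n + 1 := ⟨q.length - 1, by omega⟩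
          rw [hn]
          simp
        rw [hd, pvRp_cons, if_pos hp]
        simp
      · rw [if_neg hp]
        rw [ih _ _ (by simp only [List.length_cons] at hl; omega)]
        rw [pvRp_cons, if_neg hp]
        simp

lemma replace_eq_rp (q s : List Char) (hq : q ≠ []) :
    PySem.Chars.replace s q pvCorrectL = pvRp q s := by
  rw [PySem.Chars.replace, if_neg (by simp [hq]), go_eq q hq s.length s [] le_rfl]
  simp

lemma rp_no_occ (q : List Char) : ∀ s, ¬ q <:+: s → pvRp q s = s := by
  intro s
  induction s with
  | nil => intro _; simp [pvRp_nil]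
  | cons c t ih =>
    intro h
    have hp : ¬ q.isPrefixOf (c :: t) := fun hc =>
      h (List.isPrefixOf_iff_prefix.mp hc).isInfix
    rw [pvRp_cons, if_neg hp, ih (fun hc => h (List.infix_cons_iff.mpr (Or.inr hc)))]

-- ---- structural lemmas about the scan ----
lemma take_pres (q : List Char) (hq : q ∈ pvPats) :
    ∀ s m, m ≤ 9 → (pvRp q s).take m = s.take m := by
  have hq80 : q.length = 80 := fact_len q (List.mem_cons_of_mem _ hq)
  have h9 : q.take 9 = pvCorrectL.take 9 := fact_take9 q hq
  have hr80 : pvCorrectL.length = 80 := fact_len pvCorrectL (List.mem_cons_self)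
  suffices H : ∀ n s m, s.length ≤ n → m ≤ 9 → (pvRp q s).take m = s.take m from
    fun s m hm => H s.length s m le_rfl hm
  intro n
  induction n with
  | zero =>
    intro s m h hm
    have hnil : s = [] := List.eq_nil_of_length_eq_zero (Nat.le_zero.mp h)
    subst hnil
    simp [pvRp_nil]
  | succ f ih =>
    intro s m hl hm
    match s with
    | [] => simp [pvRp_nil]
    | c :: t =>
      by_cases hp : q.isPrefixOf (c :: t)
      · rw [pvRp_cons, if_pos hp]
        obtain ⟨w, hw⟩ := List.isPrefixOf_iff_prefix.mp hp
        rw [List.take_append_of_le_length (by omega), ← hw,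
          List.take_append_of_le_length (by omega)]
        calc pvCorrectL.take m = (pvCorrectL.take 9).take m := by
              rw [List.take_take, Nat.min_eq_left hm]
          _ = (q.take 9).take m := by rw [h9]
          _ = q.take m := by rw [List.take_take, Nat.min_eq_left hm]
      · rw [pvRp_cons, if_neg hp]
        match m with
        | 0 => simp
        | m' + 1 =>
          simp only [List.take_succ_cons]
          rw [ih t m' (by simp only [List.length_cons] at hl; omega) (by omega)]

lemma junction (X Y t t' : List Char) (hX : X ∈ pvRC) (hY : Y ∈ pvRC)
    (hG : pvGood (X ++ t)) (hG' : pvGood t') (h9 : t'.take 9 = t.take 9) :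
    pvGood (Y ++ t') := by
  intro hbad
  obtain ⟨i, hi⟩ := h_exists_drop_of_infix hbad
  have hY80 : Y.length = 80 := fact_len Y hY
  have hX80 : X.length = 80 := fact_len X hX
  have hblen : pvBad.length = 10 := by decide
  rcases lt_or_ge i 80 with hlt | hge
  · have hdrop : (Y ++ t').drop i = Y.drop i ++ t' :=
      List.drop_append_of_le_length (by omega)
    rw [hdrop] at hi
    have hbeq : pvBad = (Y.drop i ++ t').take 10 := by
      have h' := List.prefix_iff_eq_take.mp hi
      rwa [hblen] at h'
    have hdl : (Y.drop i).length = 80 - i := by simp [hY80]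
    rcases (by omega : i ≤ 70 ∨ 70 < i) with h70 | h71
    · have hb2 : pvBad = (Y.drop i).take 10 := by
        rw [hbeq, List.take_append_of_le_length (by omega)]
      exact fact_nobad Y hY (by
        rw [hb2]
        exact (List.take_prefix _ _).isInfix.trans (List.drop_suffix _ _).isInfix)
    · have hb2 : pvBad = Y.drop i ++ t'.take (10 - (80 - i)) := by
        rw [hbeq, List.take_append, List.take_of_length_le (by omega), hdl]
      have ht9 : t'.take (10 - (80 - i)) = t.take (10 - (80 - i)) := by
        have h1 : t'.take (10 - (80 - i)) = (t'.take 9).take (10 - (80 - i)) := by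
          rw [List.take_take, Nat.min_eq_left (by omega)]
        rw [h1, h9, List.take_take, Nat.min_eq_left (by omega)]
      have hYX : Y.drop i = X.drop i := by
        have h1 : Y.drop i = (Y.drop 71).drop (i - 71) := by
          rw [List.drop_drop]
          congr 1
          omega
        have h2 : X.drop i = (X.drop 71).drop (i - 71) := by
          rw [List.drop_drop]
          congr 1
          omega
        rw [h1, h2, fact_drop71 Y hY, fact_drop71 X hX]
      have hfin : pvBad <+: (X ++ t).drop i := by
        rw [List.drop_append_of_le_length (by omega), hb2, ht9, hYX]
        exact h_append_pref (List.take_prefix _ _)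
      exact hG (h_infix_of_prefix_drop hfin)
  · have hdrop : (Y ++ t').drop i = t'.drop (i - 80) := by
      calc (Y ++ t').drop i = (Y ++ t').drop (Y.length + (i - 80)) := by
            congr 1
            omega
        _ = t'.drop (i - 80) := List.drop_length_add_append _
    rw [hdrop] at hi
    exact hG' (h_infix_of_prefix_drop hi)

lemma good_pres (q : List Char) (hq : q ∈ pvPats) :
    ∀ s, pvGood s → pvGood (pvRp q s) := by
  have hq80 : q.length = 80 := fact_len q (List.mem_cons_of_mem _ hq)
  suffices H : ∀ n s, s.length ≤ n → pvGood s → pvGood (pvRp q s) from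
    fun s => H s.length s le_rfl
  intro n
  induction n with
  | zero =>
    intro s h hg
    have hnil : s = [] := List.eq_nil_of_length_eq_zero (Nat.le_zero.mp h)
    subst hnil
    simpa [pvRp_nil] using hg
  | succ f ih =>
    intro s hl hg
    match s with
    | [] => simpa [pvRp_nil] using hg
    | c :: t =>
      by_cases hp : q.isPrefixOf (c :: t)
      · rw [pvRp_cons, if_pos hp]
        have hpre := List.isPrefixOf_iff_prefix.mp hp
        have hrest : t.drop (q.length - 1) = (c :: t).drop 80 := by
          rw [hq80]
          rfl
        have hsplit : c :: t = q ++ (c :: t).drop 80 := by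
          conv_lhs => rw [← List.take_append_drop 80 (c :: t)]
          congr 1
          have h' := List.prefix_iff_eq_take.mp hpre
          rw [hq80] at h'
          exact h'.symm
        have hgrest : pvGood ((c :: t).drop 80) := h_good_suffix hg (List.drop_suffix _ _)
        have hgood' : pvGood (pvRp q ((c :: t).drop 80)) :=
          ih _ (by simp only [List.length_drop, List.length_cons]
                   simp only [List.length_cons] at hl
                   omega) hgrest
        have h9' : (pvRp q ((c :: t).drop 80)).take 9 = ((c :: t).drop 80).take 9 :=
          take_pres q hq _ 9 le_rfl
        rw [hrest]
        exact junction q pvCorrectL ((c :: t).drop 80) (pvRp q ((c :: t).drop 80))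
          (List.mem_cons_of_mem _ hq) (List.mem_cons_self)
          (by rw [← hsplit]; exact hg) hgood' h9'
      · rw [pvRp_cons, if_neg hp]
        have hgt : pvGood t := h_good_suffix hg (List.suffix_cons c t)
        have ihg : pvGood (pvRp q t) :=
          ih t (by simp only [List.length_cons] at hl; omega) hgt
        intro hbad
        rcases List.infix_cons_iff.mp hbad with hpre' | hinf
        · have hb : pvBad = '*' :: pvBad.drop 1 := by decide
          rw [hb] at hpre'
          obtain ⟨hc, htl⟩ := List.cons_prefix_cons.mp hpre'
          have h1 : pvBad.drop 1 <+: (pvRp q t).take 9 :=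
            h_pref_take htl (by decide)
          rw [take_pres q hq t 9 le_rfl] at h1
          have h2 : pvBad.drop 1 <+: t := h1.trans (List.take_prefix _ _)
          exact hg (List.infix_cons_iff.mpr (Or.inl (by
            rw [hb]
            exact List.cons_prefix_cons.mpr ⟨hc, h2⟩)))
        · exact ihg hinf

lemma pfx_pres (q' q : List Char) (hq' : q' ∈ pvPats) (hq : q ∈ pvPats) :
    ∀ s m, 1 ≤ m → m ≤ 79 → ¬ q'.drop m <+: s → ¬ q'.drop m <+: pvRp q s := by
  have hq80 : q.length = 80 := fact_len q (List.mem_cons_of_mem _ hq)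
  have hq'80 : q'.length = 80 := fact_len q' (List.mem_cons_of_mem _ hq')
  have hr80 : pvCorrectL.length = 80 := fact_len pvCorrectL (List.mem_cons_self)
  suffices H : ∀ n s m, s.length ≤ n → 1 ≤ m → m ≤ 79 → ¬ q'.drop m <+: s →
      ¬ q'.drop m <+: pvRp q s from
    fun s m h1 h2 h3 => H s.length s m le_rfl h1 h2 h3
  intro n
  induction n with
  | zero =>
    intro s m h hm1 hm2 hns
    have hnil : s = [] := List.eq_nil_of_length_eq_zero (Nat.le_zero.mp h)
    subst hnil
    simpa [pvRp_nil] using hns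
  | succ f ih =>
    intro s m hl hm1 hm2 hns
    match s with
    | [] => simpa [pvRp_nil] using hns
    | c :: t =>
      have hvlen : (q'.drop m).length = 80 - m := by simp [hq'80]
      by_cases hp : q.isPrefixOf (c :: t)
      · rw [pvRp_cons, if_pos hp]
        intro hpre
        have hveq : q'.drop m = pvCorrectL.take (80 - m) := by
          have h' := List.prefix_iff_eq_take.mp hpre
          rw [hvlen, List.take_append_of_le_length (by omega)] at h'
          exact h'
        rcases (by omega : m ≤ 78 ∨ 78 < m) with h78 | h79
        · apply fact_overlap2 q' hq' (m - 1) (by omega)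
          have e1 : m - 1 + 1 = m := by omega
          have e2 : 79 - (m - 1) = 80 - m := by omega
          rw [e1, e2]
          exact hveq
        · -- m = 79 : q'.drop 79 = ['/'] is a prefix of c :: t since q starts with '/'
          have hm79 : m = 79 := by omega
          subst hm79
          have hv : q'.drop 79 = ['/'] := fact_drop79 q' (List.mem_cons_of_mem _ hq')
          apply hns
          rw [hv]
          have hc : (c :: t).take 1 = q.take 1 := by
            obtain ⟨w, hw⟩ := List.isPrefixOf_iff_prefix.mp hp
            rw [← hw, List.take_append_of_le_length (by omega)]
          have hq1 : q.take 1 = ['/'] := fact_take1 q hq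
          rw [hq1] at hc
          exact (by rw [← hc]; exact List.take_prefix 1 (c :: t))
      · rw [pvRp_cons, if_neg hp]
        rcases (by omega : m ≤ 78 ∨ 78 < m) with h78 | h79
        · intro hpre
          have hdm : q'.drop m = q'[m] :: q'.drop (m + 1) :=
            List.drop_eq_getElem_cons (by omega)
          rw [hdm] at hpre
          obtain ⟨hc, htl⟩ := List.cons_prefix_cons.mp hpre
          have hnt : ¬ q'.drop (m + 1) <+: t := by
            intro hcontra
            exact hns (by
              rw [hdm, hc]
              exact List.cons_prefix_cons.mpr ⟨rfl, hcontra⟩)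
          exact ih t (m + 1) (by simp only [List.length_cons] at hl; omega)
            (by omega) (by omega) hnt htl
        · have hm79 : m = 79 := by omega
          subst hm79
          have hv : q'.drop 79 = ['/'] := fact_drop79 q' (List.mem_cons_of_mem _ hq')
          intro hpre
          rw [hv] at hpre
          rcases List.cons_prefix_cons.mp hpre with ⟨hc, -⟩
          exact hns (by
            rw [hv, ← hc]
            exact List.cons_prefix_cons.mpr ⟨rfl, List.nil_prefix⟩)

lemma walk (q : List Char) :
    ∀ u t, (∀ i < u.length, ¬ q <+: (u.drop i ++ t)) → pvRp q (u ++ t) = u ++ pvRp q t := by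
  intro u
  induction u with
  | nil => intro t _; simp
  | cons a u ih =>
    intro t h
    have h0 : ¬ q.isPrefixOf (a :: (u ++ t)) := by
      intro hc
      exact h 0 (by simp) (by simpa using List.isPrefixOf_iff_prefix.mp hc)
    rw [List.cons_append, pvRp_cons, if_neg h0,
      ih t (fun i hi => by simpa using h (i + 1) (by simp only [List.length_cons]; omega))]
    rfl

lemma no_inside (X : List Char) (hX : X ∈ pvRC) (q : List Char) (hq : q ∈ pvPats)
    (t : List Char) (hG : pvGood (X ++ t)) :
    ∀ i, 1 ≤ i → i < 80 → ¬ q <+: (X.drop i ++ t) := by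
  intro i h1 h80 hpre
  have hX80 : X.length = 80 := fact_len X hX
  have hq80 : q.length = 80 := fact_len q (List.mem_cons_of_mem _ hq)
  have hdl : (X.drop i).length = 80 - i := by simp [hX80]
  have hqeq : q = (X.drop i ++ t).take 80 := by
    have h' := List.prefix_iff_eq_take.mp hpre
    rwa [hq80] at h'
  rcases (by omega : i ≤ 78 ∨ 78 < i) with h78 | h79
  · have hkey : q.take (80 - i) = X.drop i := by
      rw [hqeq, List.take_take, Nat.min_eq_left (by omega),
        List.take_append_of_le_length (by omega), List.take_of_length_le (by omega)]
    exact fact_overlap X hX q hq (i - 1) (by omega) (by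
      have e1 : i - 1 + 1 = i := by omega
      have e2 : 79 - (i - 1) = 80 - i := by omega
      rw [e1, e2, hkey])
  · have hi79 : i = 79 := by omega
    subst hi79
    have hX79 : X.drop 79 = ['/'] := fact_drop79 X hX
    have hqeq2 : q = ['/'] ++ t.take 79 := by
      rw [hqeq, List.take_append, hX79]
      simp
    have hq1 : q.drop 1 = t.take 79 := by rw [hqeq2]; simp
    have hbadt : pvBad = X.drop 78 ++ t.take 8 := by
      rw [fact_badq q hq, fact_drop78 X hX, hq1, List.take_take]
      rfl
    have hfin : pvBad <+: (X ++ t).drop 78 := by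
      rw [List.drop_append_of_le_length (by omega), hbadt]
      exact h_append_pref (List.take_prefix _ _)
    exact hG (h_infix_of_prefix_drop hfin)

lemma chain_skip (X : List Char) (hX : X ∈ pvRC) :
    ∀ Q, (∀ x ∈ Q, x ∈ pvPats ∧ x ≠ X) → ∀ t, pvGood (X ++ t) →
      pvChain Q (X ++ t) = X ++ pvChain Q t ∧ pvGood (X ++ pvChain Q t) := by
  intro Q
  induction Q with
  | nil => exact fun _ t hg => ⟨rfl, hg⟩
  | cons q Q ih =>
    intro hQ t hg
    obtain ⟨hqP, hqX⟩ := hQ q (List.mem_cons_self)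
    have hX80 : X.length = 80 := fact_len X hX
    have hq80 : q.length = 80 := fact_len q (List.mem_cons_of_mem _ hqP)
    have hstep : pvRp q (X ++ t) = X ++ pvRp q t := by
      apply walk
      intro i hi
      rw [hX80] at hi
      rcases Nat.eq_zero_or_pos i with rfl | hpos
      · intro hpre
        simp only [List.drop_zero] at hpre
        apply hqX
        have h' := List.prefix_iff_eq_take.mp hpre
        rw [hq80, List.take_append_of_le_length (by omega),
          List.take_of_length_le (by omega)] at h'
        exact h'
      · exact no_inside X hX q hqP t hg i hpos hi
    have hgt : pvGood t := h_good_suffix hg (List.suffix_append X t)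
    have hg1 : pvGood (pvRp q t) := good_pres q hqP t hgt
    have hgX : pvGood (X ++ pvRp q t) :=
      junction X X t (pvRp q t) hX hX hg hg1 (take_pres q hqP t 9 le_rfl)
    have hrec := ih (fun x hx => hQ x (List.mem_cons_of_mem _ hx)) (pvRp q t) hgX
    exact ⟨by rw [chain_cons, hstep, hrec.1, chain_cons], by rw [chain_cons]; exact hrec.2⟩

lemma chain_none : ∀ Q, (∀ x ∈ Q, x ∈ pvPats) → ∀ c t,
    (∀ p ∈ pvPats, ¬ p <+: (c :: t)) → pvChain Q (c :: t) = c :: pvChain Q t := by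
  intro Q
  induction Q with
  | nil => intros; rfl
  | cons q Q ih =>
    intro hQ c t h
    have hqP := hQ q (List.mem_cons_self)
    have hp : ¬ q.isPrefixOf (c :: t) := fun hc => h q hqP (List.isPrefixOf_iff_prefix.mp hc)
    have hinv : ∀ p ∈ pvPats, ¬ p <+: c :: pvRp q t := by
      intro p hpP hpre
      have hp80 : p.length = 80 := fact_len p (List.mem_cons_of_mem _ hpP)
      match p, hp80 with
      | p0 :: ptl, _ =>
        obtain ⟨rfl, htl⟩ := List.cons_prefix_cons.mp hpre
        have hnt : ¬ ptl <+: t := by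
          intro hc
          exact h _ hpP (List.cons_prefix_cons.mpr ⟨rfl, hc⟩)
        have hdrop : (p0 :: ptl).drop 1 = ptl := rfl
        exact (pfx_pres (p0 :: ptl) q hpP hqP t 1 le_rfl (by omega)
          (by rw [hdrop]; exact hnt)) (by rw [hdrop]; exact htl)
    rw [chain_cons, pvRp_cons, if_neg hp,
      ih (fun x hx => hQ x (List.mem_cons_of_mem _ hx)) c (pvRp q t) hinv, chain_cons]

lemma chain_nil : ∀ Q, pvChain Q [] = [] := by
  intro Q
  induction Q with
  | nil => rfl
  | cons q Q ih => rw [chain_cons, pvRp_nil]; exact ih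

lemma chain_key (q t₀ : List Char) (hq : q ∈ pvPats) (hG : pvGood (q ++ t₀)) :
    pvChain pvPats (q ++ t₀) = pvCorrectL ++ pvChain pvPats t₀ := by
  obtain ⟨k, hk, hget⟩ := List.mem_iff_getElem.mp hq
  have hq80 : q.length = 80 := fact_len q (List.mem_cons_of_mem _ hq)
  have hsplit : pvPats = pvPats.take k ++ q :: pvPats.drop (k + 1) := by
    conv_lhs => rw [← List.take_append_drop k pvPats]
    congr 1
    rw [← hget]
    exact (List.getElem_cons_drop hk).symm
  have hQ1 : ∀ x ∈ pvPats.take k, x ∈ pvPats ∧ x ≠ q := by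
    intro x hx
    refine ⟨List.mem_of_mem_take hx, ?_⟩
    obtain ⟨j, hj, hjx⟩ := List.mem_iff_getElem.mp hx
    have hjk : j < k := by
      have := hj
      simp only [List.length_take] at this
      omega
    rw [List.getElem_take] at hjx
    intro hxq
    have : j = k := (List.Nodup.getElem_inj_iff fact_nodup).mp (by rw [hjx, hget, hxq])
    omega
  have hQ2 : ∀ x ∈ pvPats.drop (k + 1), x ∈ pvPats ∧ x ≠ pvCorrectL := by
    intro x hx
    have hmem := List.mem_of_mem_drop hx
    exact ⟨hmem, fun hc => fact_rnot (hc ▸ hmem)⟩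
  have hc1 := chain_skip q (List.mem_cons_of_mem _ hq) (pvPats.take k) hQ1 t₀ hG
  set u := pvChain (pvPats.take k) t₀ with hu
  have hrp : pvRp q (q ++ u) = pvCorrectL ++ pvRp q u := by
    match q, hq80 with
    | q0 :: qtl, hq80' =>
      rw [List.cons_append, pvRp_cons,
        if_pos (List.isPrefixOf_iff_prefix.mpr ⟨u, by simp⟩)]
      congr 1
      have hlen : (q0 :: qtl).length - 1 = qtl.length := by simp
      rw [hlen, List.drop_left]
  have hgq_u : pvGood (q ++ u) := hc1.2
  have hgr : pvGood (pvRp q u) := good_pres q hq u (h_good_suffix hgq_u (List.suffix_append q u))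
  have hgru : pvGood (pvCorrectL ++ pvRp q u) :=
    junction q pvCorrectL u (pvRp q u) (List.mem_cons_of_mem _ hq) (List.mem_cons_self)
      hgq_u hgr (take_pres q hq u 9 le_rfl)
  have hc2 := chain_skip pvCorrectL (List.mem_cons_self) (pvPats.drop (k + 1)) hQ2
    (pvRp q u) hgru
  conv_lhs => rw [hsplit]
  conv_rhs => rw [hsplit]
  show pvChain (pvPats.take k ++ q :: pvPats.drop (k + 1)) (q ++ t₀) = _
  unfold pvChain
  rw [List.foldl_append, List.foldl_append]
  show pvChain (q :: pvPats.drop (k + 1)) (pvChain (pvPats.take k) (q ++ t₀)) =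
    pvCorrectL ++ pvChain (q :: pvPats.drop (k + 1)) (pvChain (pvPats.take k) t₀)
  rw [hc1.1, ← hu, chain_cons, chain_cons, hrp, hc2.1]

lemma main_eq : ∀ fuel s, s.length ≤ fuel → pvGood s → pvChain pvPats s = pvScanGo fuel s := by
  intro fuel
  induction fuel with
  | zero =>
    intro s h _
    have hnil : s = [] := List.eq_nil_of_length_eq_zero (Nat.le_zero.mp h)
    subst hnil
    rw [chain_nil]
    rfl
  | succ f ih =>
    intro s hl hg
    match s with
    | [] => rw [chain_nil]; rfl
    | c :: t =>
      by_cases hcond : (pvMarker.isPrefixOf (c :: t) && pvKnown.contains ((c :: t).take 80)) = true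
      · have hmem : (c :: t).take 80 ∈ pvPats :=
          h_mem_contains.mp ((Bool.and_eq_true _ _).mp hcond).2
        have hq80 : ((c :: t).take 80).length = 80 := fact_len _ (List.mem_cons_of_mem _ hmem)
        have hsplit : c :: t = (c :: t).take 80 ++ (c :: t).drop 80 :=
          (List.take_append_drop 80 (c :: t)).symm
        have hgd : pvGood ((c :: t).drop 80) := h_good_suffix hg (List.drop_suffix _ _)
        have hld : ((c :: t).drop 80).length ≤ f := by
          simp only [List.length_drop, List.length_cons]
          simp only [List.length_cons] at hl
          omega
        rw [pvScanGo, if_pos hcond]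
        calc pvChain pvPats (c :: t)
            = pvChain pvPats ((c :: t).take 80 ++ (c :: t).drop 80) := by rw [← hsplit]
          _ = pvCorrectL ++ pvChain pvPats ((c :: t).drop 80) :=
              chain_key _ _ hmem (by rw [← hsplit]; exact hg)
          _ = pvCorrectL ++ pvScanGo f ((c :: t).drop 80) := by rw [ih _ hld hgd]
      · have hnp : ∀ p ∈ pvPats, ¬ p <+: (c :: t) := by
          intro p hp hpre
          apply hcond
          rw [Bool.and_eq_true]
          refine ⟨List.isPrefixOf_iff_prefix.mpr ((fact_marker p hp).trans hpre), ?_⟩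
          have hp80 : p.length = 80 := fact_len p (List.mem_cons_of_mem _ hp)
          have htake : (c :: t).take 80 = p := by
            have h' := List.prefix_iff_eq_take.mp hpre
            rw [hp80] at h'
            exact h'.symm
          rw [htake]
          exact h_mem_contains.mpr hp
        rw [pvScanGo, if_neg hcond,
          chain_none pvPats (fun x hx => hx) c t hnp,
          ih t (by simp only [List.length_cons] at hl; omega)
            (h_good_suffix hg (List.suffix_cons c t))]

lemma fold_eq : ∀ (L : List String) (c : String), (∀ p ∈ L, p.toList ≠ []) →
    L.foldl (fun c searched =>
        if PySem.Str.find c searched ≠ -1 then PySem.Str.replace c searched pvCorrect else c) c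
      = String.ofList (pvChain (L.map String.toList) c.toList) := by
  intro L
  induction L with
  | nil =>
    intro c _
    simp [pvChain, String.ofList_toList]
  | cons p L ih =>
    intro c hne
    have hpnil := hne p (List.mem_cons_self)
    have hstep : (if PySem.Str.find c p ≠ -1 then PySem.Str.replace c p pvCorrect else c)
        = String.ofList (pvRp p.toList c.toList) := by
      by_cases hf : PySem.Str.find c p = -1
      · rw [if_neg (by simpa using hf)]
        have hni : ¬ p.toList <:+: c.toList := (PySem.Str.find_eq_neg_one_iff c p).mp hf
        rw [rp_no_occ _ _ hni, String.ofList_toList]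
      · rw [if_pos hf]
        show String.ofList (PySem.Chars.replace c.toList p.toList pvCorrectL) = _
        rw [replace_eq_rp _ _ hpnil]
    rw [List.foldl_cons, hstep, ih _ (fun x hx => hne x (List.mem_cons_of_mem _ hx)),
      String.toList_ofList, List.map_cons, chain_cons]

lemma a_eq_chain (login copy : String) :
    replace_user_email login copy = String.ofList (pvChain pvPats copy.toList) := by
  unfold replace_user_email
  exact fold_eq pvLogins copy fact_nonnil

-- ===== VERDICT (by name: the statement is the Claim_ definition above) =====
theorem replace_user_email_spec : Claim_equal_replace_user_email := by
  intro login copy _hDom hPre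
  unfold Spec_replace_user_email replace_user_email_alt
  rw [a_eq_chain, main_eq copy.toList.length copy.toList le_rfl hPre]
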